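-- pv_equiv track=rewrite | github.com/MrBrantCode/unitest_baseline | mut_generate/mist_train_taco/taco_4688/solution.py | calculate_weight_range_sum
-- ===== SOURCE A (Python) =====
-- def calculate_weight_range_sum(N, M, weights):
--     def list_eq(get_num, first):
--         if first == 1:
--             return False
--         for i in range(len(get_num) - 1):
--             if get_num[0] != get_num[i + 1]:
--                 return False
--         return True
--
--     get_num = [0 for _ in range(N)]
--     first = 1
--     next_num = 0
--     res = 0
--
--     while not list_eq(get_num, first):
--         first = 0
--         weight = []
--         for _ in range(M):
--             weight.append(weights[next_num])
--             get_num[next_num] += 1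
--             next_num += 1
--             if next_num > N - 1:
--                 next_num = 0
--         res += max(weight) - min(weight)
--
--     return res
-- ===== SOURCE B (Python) =====
-- def calculate_weight_range_sum(N, M, weights):
--     # Closed-form window count K = N // gcd(N, M); each window is one contiguous
--     # slice of a tiled copy of the first N weights (no counter array, no rescans).
--     a, b = M, N
--     while b:
--         a, b = b, a % b
--     K = N // a
--     w = [weights[i] for i in range(N)]
--     d = w * (M // N + 2)
--     total = 0
--     for k in range(K):
--         s = (k * M) % N
--         win = d[s:s + M]
--         total += max(win) - min(win)
--     return total
-- ===== Notes on version B (the rewrite author's own statement) =====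
-- stated objective: faster
-- what changed: B computes the number of windows in closed form as N//gcd(N,M) and takes each window as one contiguous slice of a tiled copy of weights[:N], eliminating A's per-window O(N) all-equal scan of a counter array and its per-element counter/pointer bookkeeping.
import Mathlib
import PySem

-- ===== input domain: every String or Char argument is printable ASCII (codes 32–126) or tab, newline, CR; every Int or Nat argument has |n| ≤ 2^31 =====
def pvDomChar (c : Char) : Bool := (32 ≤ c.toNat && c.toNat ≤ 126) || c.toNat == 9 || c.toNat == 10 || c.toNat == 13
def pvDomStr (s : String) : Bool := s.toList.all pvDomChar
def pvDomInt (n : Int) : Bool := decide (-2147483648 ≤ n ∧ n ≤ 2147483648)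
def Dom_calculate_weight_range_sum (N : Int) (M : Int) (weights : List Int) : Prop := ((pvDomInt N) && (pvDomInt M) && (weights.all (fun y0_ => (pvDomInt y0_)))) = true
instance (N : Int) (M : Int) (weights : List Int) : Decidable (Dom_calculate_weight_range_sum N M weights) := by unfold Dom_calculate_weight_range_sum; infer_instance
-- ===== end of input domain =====

-- B replaces A's fixpoint detection (rescan the whole counter array after every window) by the
-- closed-form window count N // gcd(N, M) and takes each window as one contiguous slice of a
-- tiled copy of weights[:N]; objective: faster (drops the per-window O(N) scan and the
-- per-element counter/pointer bookkeeping).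

-- ===== PORT A =====
-- A's inner helper list_eq (the early-return scan is the List.all over the same range)
def pvListEqA (get_num : List Int) (first : Int) : Bool :=
  if first = 1 then false
  else (List.range (get_num.length - 1)).all
    (fun i => get_num.getD 0 0 == get_num.getD (i + 1) 0)

-- the 'for _ in range(M)' body; next_num stays ≥ 0 throughout A's execution, so .toNat is exact
def pvInnerA (weights : List Int) (N : Int) :
    Nat → List Int × List Int × Int → List Int × List Int × Int
  | 0, st => st
  | mm + 1, (weight, get_num, next_num) =>
      let weight' := weight ++ [(PySem.List.pyGet? weights next_num).getD 0]
      let get_num' := get_num.set next_num.toNat (get_num.getD next_num.toNat 0 + 1)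
      let nn := next_num + 1
      let nn' := if nn > N - 1 then 0 else nn
      pvInnerA weights N mm (weight', get_num', nn')

-- A's 'while not list_eq(...)' loop; the fuel N.toNat+1 only makes the port total: on Pre_ the
-- loop stops after N/gcd(N,M) ≤ N iterations, so the fuel is never exhausted there
def pvOuterA (weights : List Int) (N M : Int) :
    Nat → List Int → Int → Int → Int → Int
  | 0, _get_num, _first, _next_num, res => res
  | fuel + 1, get_num, first, next_num, res =>
      if pvListEqA get_num first then res
      else
        let st := pvInnerA weights N M.toNat ([], get_num, next_num)
        pvOuterA weights N M fuel st.2.1 0 st.2.2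
          (res + ((PySem.List.max? st.1 (fun x => x)).getD 0
                  - (PySem.List.min? st.1 (fun x => x)).getD 0))

def calculate_weight_range_sum (N : Int) (M : Int) (weights : List Int) : Int :=
  pvOuterA weights N M (N.toNat + 1) (List.replicate N.toNat 0) 1 0 0

-- ===== PORT B =====
-- Source B's Euclid loop 'while b: a, b = b, a % b'; N, M ≥ 0 on the admitted domain, so it runs on Nat
def pvGcdB : Nat → Nat → Nat
  | a, 0 => a
  | a, b + 1 => pvGcdB (b + 1) (a % (b + 1))
  termination_by _a b => b
  decreasing_by exact Nat.mod_lt _ (Nat.succ_pos b)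

-- one loop body of Source B: max(win) - min(win) for win = d[s:s+M]
def pvWinB (d : List Int) (s m : Nat) : Int :=
  let win := PySem.List.slice d (some (s : Int)) (some ((s : Int) + (m : Int)))
  (PySem.List.max? win (fun x => x)).getD 0 - (PySem.List.min? win (fun x => x)).getD 0

-- K = N // gcd and reps = M // N + 2 are Python '//' on the nonnegative admitted domain, i.e.
-- Nat division; 'range(N)' for the comprehension building w is List.range N.toNat (empty for N ≤ 0)
def calculate_weight_range_sum_alt (N : Int) (M : Int) (weights : List Int) : Int :=
  let g := pvGcdB M.toNat N.toNat
  let K := N.toNat / g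
  let w := (List.range N.toNat).map (fun i => (PySem.List.pyGet? weights ((i : Nat) : Int)).getD 0)
  let d := PySem.List.pyRepeat w ((M.toNat / N.toNat + 2 : Nat) : Int)
  (List.range K).foldl
    (fun res k => res + pvWinB d ((k * M.toNat) % N.toNat) M.toNat) 0

-- ===== PRECONDITION & SPEC =====
-- Pre_ excludes exactly the inputs on which A raises: N ≤ 0 or M ≤ 0 (IndexError/ValueError on
-- the first window) and len(weights) < N (IndexError before the counters can all become equal).
def Pre_calculate_weight_range_sum (N : Int) (M : Int) (weights : List Int) : Prop :=
  1 ≤ N ∧ 1 ≤ M ∧ N ≤ (weights.length : Int)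
instance (N : Int) (M : Int) (weights : List Int) : Decidable (Pre_calculate_weight_range_sum N M weights) := by unfold Pre_calculate_weight_range_sum; infer_instance

def pvWitness_calculate_weight_range_sum : Int × Int × List Int := (3, 2, [1, 5, 2])

def Spec_calculate_weight_range_sum (N : Int) (M : Int) (weights : List Int) (out : Int) : Prop := out = calculate_weight_range_sum_alt N M weights
instance (N : Int) (M : Int) (weights : List Int) (out : Int) : Decidable (Spec_calculate_weight_range_sum N M weights out) := by unfold Spec_calculate_weight_range_sum; infer_instance

-- ===== CLAIM (what is proved, stated in full; the proofs are below) =====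
def Claim_equal_calculate_weight_range_sum : Prop := ∀ (N : Int) (M : Int) (weights : List Int), Dom_calculate_weight_range_sum N M weights → Pre_calculate_weight_range_sum N M weights → Spec_calculate_weight_range_sum N M weights (calculate_weight_range_sum N M weights)

-- ===== LEMMAS AND PROOFS =====

theorem pvSuccMod (n T : Nat) (hn : 0 < n) :
    ((T + 1) % n = (if T % n + 1 = n then 0 else T % n + 1)) ∧
    ((T + 1) / n = (if T % n + 1 = n then T / n + 1 else T / n)) := by
  have e1 := Nat.div_add_mod T n
  have h1 : T % n < n := Nat.mod_lt _ hn
  by_cases h : T % n + 1 = n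
  · have heq : T + 1 = n * (T / n + 1) := by rw [Nat.mul_add, Nat.mul_one]; omega
    simp only [h] at *
    constructor
    · rw [heq]; exact Nat.mul_mod_right n _
    · rw [heq]; exact Nat.mul_div_cancel_left _ hn
  · have heq : T + 1 = n * (T / n) + (T % n + 1) := by omega
    rw [if_neg h, if_neg h]
    constructor
    · rw [heq, Nat.mul_add_mod, Nat.mod_eq_of_lt (by omega)]
    · rw [heq, Nat.mul_add_div hn]
      have : (T % n + 1) / n = 0 := Nat.div_eq_of_lt (by omega)
      omega

theorem pvCountP_mod (n : Nat) (hn : 0 < n) (i : Nat) (hi : i < n) (T : Nat) :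
    (List.range T).countP (fun t => t % n == i) = T / n + (if i < T % n then 1 else 0) := by
  induction T with
  | zero => simp
  | succ T ih =>
    rw [List.range_succ, List.countP_append, ih]
    simp only [List.countP_cons, List.countP_nil, beq_iff_eq]
    obtain ⟨hmod, hdiv⟩ := pvSuccMod n T hn
    have h1 : T % n < n := Nat.mod_lt _ hn
    split_ifs at * <;> omega

def pvCnt (n T : Nat) : List Int :=
  (List.range n).map (fun i => ((List.range T).countP (fun t => t % n == i) : Int))

theorem pvCnt_zero (n : Nat) : pvCnt n 0 = List.replicate n 0 := by
  simp [pvCnt]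

theorem pvCnt_getD (n T i : Nat) (hi : i < n) :
    (pvCnt n T).getD i 0 = ((List.range T).countP (fun t => t % n == i) : Int) := by
  rw [List.getD_eq_getElem _ _ (by simp [pvCnt]; omega)]
  simp [pvCnt]

theorem pvCnt_succ (n T : Nat) (hn : 0 < n) :
    pvCnt n (T + 1) = (pvCnt n T).set (T % n) ((pvCnt n T).getD (T % n) 0 + 1) := by
  have hlt : T % n < n := Nat.mod_lt _ hn
  apply List.ext_getElem
  · simp [pvCnt]
  · intro i h1 h2
    have hi : i < n := by simpa [pvCnt] using h1
    rw [List.getElem_set]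
    by_cases he : T % n = i
    · rw [if_pos he, pvCnt_getD n T (T % n) hlt, he]
      simp only [pvCnt, List.getElem_map, List.getElem_range]
      rw [List.range_succ, List.countP_append]
      simp [he]
    · rw [if_neg he]
      simp only [pvCnt, List.getElem_map, List.getElem_range]
      rw [List.range_succ, List.countP_append]
      simp [he]

theorem pvListEqA_first (g : List Int) : pvListEqA g 1 = false := by
  simp [pvListEqA]

theorem pvListEqA_cnt (n T : Nat) (hn : 0 < n) :
    pvListEqA (pvCnt n T) 0 = true ↔ n ∣ T := by
  have hlen : (pvCnt n T).length = n := by simp [pvCnt]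
  have hr : T % n < n := Nat.mod_lt _ hn
  rw [pvListEqA, if_neg (by norm_num), List.all_eq_true]
  constructor
  · intro h
    by_contra hnd
    have hrpos : 0 < T % n := by
      rcases Nat.eq_zero_or_pos (T % n) with h0 | h0
      · exact absurd ((Nat.dvd_iff_mod_eq_zero ..).mpr h0) hnd
      · exact h0
    have hmem : T % n - 1 ∈ List.range ((pvCnt n T).length - 1) := by
      rw [List.mem_range]; omega
    have := h _ hmem
    rw [beq_iff_eq, pvCnt_getD n T 0 hn, pvCnt_getD n T (T % n - 1 + 1) (by omega)] at this
    rw [pvCountP_mod n hn 0 hn, pvCountP_mod n hn _ (by omega)] at this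
    rw [if_pos hrpos, if_neg (by omega)] at this
    omega
  · intro hd i hi
    rw [List.mem_range, hlen] at hi
    rw [beq_iff_eq, pvCnt_getD n T 0 hn, pvCnt_getD n T (i + 1) (by omega)]
    rw [pvCountP_mod n hn 0 hn, pvCountP_mod n hn _ (by omega)]
    have : T % n = 0 := (Nat.dvd_iff_mod_eq_zero ..).mp hd
    rw [this]
    simp

def pvWinL (weights : List Int) (n m T : Nat) : List Int :=
  (List.range m).map (fun j => weights.getD ((T + j) % n) 0)

theorem pvWinL_succ (weights : List Int) (n mm T : Nat) :
    pvWinL weights n (mm + 1) T = weights.getD (T % n) 0 :: pvWinL weights n mm (T + 1) := by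
  simp only [pvWinL, List.range_succ_eq_map, List.map_cons, List.map_map, Nat.add_zero]
  refine congrArg _ (List.map_congr_left fun j _ => ?_)
  simp only [Function.comp_apply]
  have : T + (j + 1) = (T + 1) + j := by omega
  rw [this]

theorem pvInnerA_spec (weights : List Int) (n : Nat) (hn : 0 < n)
    (_hw : n ≤ weights.length) :
    ∀ (mm T : Nat) (wl : List Int),
      pvInnerA weights (n : Int) mm (wl, pvCnt n T, ((T % n : Nat) : Int)) =
        (wl ++ pvWinL weights n mm T, pvCnt n (T + mm), (((T + mm) % n : Nat) : Int)) := by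
  intro mm
  induction mm with
  | zero => intro T wl; simp [pvInnerA, pvWinL]
  | succ mm ih =>
    intro T wl
    rw [pvInnerA]
    have hr : T % n < n := Nat.mod_lt _ hn
    have e1 : (PySem.List.pyGet? weights ((T % n : Nat) : Int)).getD 0
        = weights.getD (T % n) 0 := by
      rw [PySem.List.pyGet?_natCast]
      exact (List.getD_eq_getElem?_getD ..).symm
    have e2 : (((T % n : Nat) : Int)).toNat = T % n := Int.toNat_natCast _
    have e3 : (if ((T % n : Nat) : Int) + 1 > (n : Int) - 1 then 0 else ((T % n : Nat) : Int) + 1)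
        = (((T + 1) % n : Nat) : Int) := by
      have h1 := (pvSuccMod n T hn).1
      split_ifs with h
      · rw [h1, if_pos (by omega)]; simp
      · rw [h1, if_neg (by omega)]; push_cast; ring
    rw [e1, e2, e3, ← pvCnt_succ n T hn]
    have := ih (T + 1) (wl ++ [weights.getD (T % n) 0])
    rw [this, pvWinL_succ]
    simp [show T + 1 + mm = T + (mm + 1) by omega]

theorem pvK_dvd (n m : Nat) (hn : 0 < n) (_hm : 0 < m) :
    n ∣ (n / Nat.gcd n m) * m := by
  have hg : 0 < Nat.gcd n m := Nat.gcd_pos_of_pos_left _ hn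
  obtain ⟨n', hn'⟩ := Nat.gcd_dvd_left n m
  obtain ⟨m', hm'⟩ := Nat.gcd_dvd_right n m
  set g := Nat.gcd n m with hgdef
  have hKn : n / g = n' := Nat.div_eq_of_eq_mul_left hg (by rw [Nat.mul_comm] at hn'; exact hn')
  refine ⟨m', ?_⟩
  rw [hKn, hm']
  conv_rhs => rw [hn']
  ring

theorem pvK_not_dvd (n m k : Nat) (hn : 0 < n) (_hm : 0 < m)
    (hk : 0 < k) (hlt : k < n / Nat.gcd n m) : ¬ n ∣ k * m := by
  intro hd
  have hg : 0 < Nat.gcd n m := Nat.gcd_pos_of_pos_left _ hn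
  have hco : Nat.Coprime (n / Nat.gcd n m) (m / Nat.gcd n m) :=
    Nat.coprime_div_gcd_div_gcd hg
  obtain ⟨n', hn'⟩ := Nat.gcd_dvd_left n m
  obtain ⟨m', hm'⟩ := Nat.gcd_dvd_right n m
  set g := Nat.gcd n m with hgdef
  have hKn : n / g = n' := Nat.div_eq_of_eq_mul_left hg (by rw [Nat.mul_comm] at hn'; exact hn')
  have hKm : m / g = m' := Nat.div_eq_of_eq_mul_left hg (by rw [Nat.mul_comm] at hm'; exact hm')
  have h1 : n' ∣ k * m' := by
    have h2 : g * n' ∣ g * (k * m') := by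
      rw [← hn']
      have : g * (k * m') = k * (g * m') := by ring
      rw [this, ← hm']
      exact hd
    exact (Nat.mul_dvd_mul_iff_left hg).mp h2
  rw [hKn, hKm] at hco
  have h2 : n' ∣ k := hco.dvd_of_dvd_mul_right h1
  have := Nat.le_of_dvd hk h2
  omega

def pvPtp (l : List Int) : Int :=
  (PySem.List.max? l (fun x => x)).getD 0 - (PySem.List.min? l (fun x => x)).getD 0

theorem pvOuterA_spec (weights : List Int) (n m : Nat) (hn : 0 < n) (hm : 0 < m)
    (hw : n ≤ weights.length) :
    ∀ (fuel k : Nat) (res : Int), 0 < k → k ≤ n / Nat.gcd n m → n / Nat.gcd n m < k + fuel →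
      pvOuterA weights (n : Int) (m : Int) fuel (pvCnt n (k * m)) 0 (((k * m) % n : Nat) : Int) res =
        res + ∑ j ∈ Finset.Ico k (n / Nat.gcd n m), pvPtp (pvWinL weights n m (j * m)) := by
  intro fuel
  induction fuel with
  | zero => intro k res hk hkK hfuel; omega
  | succ fuel ih =>
    intro k res hk hkK hfuel
    rcases Nat.lt_or_ge k (n / Nat.gcd n m) with hlt | hge
    · rw [pvOuterA, if_neg]
      · have hMt : ((m : Int)).toNat = m := Int.toNat_natCast m
        rw [hMt, pvInnerA_spec weights n hn hw m (k * m) []]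
        simp only [List.nil_append]
        have harr : k * m + m = (k + 1) * m := by ring
        rw [harr]
        have hrec := ih (k + 1) (res + pvPtp (pvWinL weights n m (k * m))) (by omega) (by omega) (by omega)
        unfold pvPtp at hrec
        rw [hrec, Finset.sum_eq_sum_Ico_succ_bot hlt]
        unfold pvPtp
        ring
      · rw [pvListEqA_cnt n (k * m) hn]
        exact pvK_not_dvd n m k hn hm hk hlt
    · have hkK' : k = n / Nat.gcd n m := by omega
      rw [pvOuterA, if_pos]
      · rw [hkK', Finset.Ico_self, Finset.sum_empty, add_zero]
      · rw [pvListEqA_cnt n (k * m) hn, hkK']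
        exact pvK_dvd n m hn hm

theorem pvA_eq (weights : List Int) (n m : Nat) (hn : 0 < n) (hm : 0 < m)
    (hw : n ≤ weights.length) :
    calculate_weight_range_sum (n : Int) (m : Int) weights =
      ∑ j ∈ Finset.range (n / Nat.gcd n m), pvPtp (pvWinL weights n m (j * m)) := by
  have hg : 0 < Nat.gcd n m := Nat.gcd_pos_of_pos_left _ hn
  have hK1 : 1 ≤ n / Nat.gcd n m := (Nat.one_le_div_iff hg).mpr (Nat.gcd_le_left _ hn)
  have hKn : n / Nat.gcd n m ≤ n := Nat.div_le_self _ _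
  unfold calculate_weight_range_sum
  rw [Int.toNat_natCast, pvOuterA, if_neg (by rw [pvListEqA_first]; simp)]
  have h0 : List.replicate n (0 : Int) = pvCnt n 0 := (pvCnt_zero n).symm
  have h1 : (0 : Int) = ((0 % n : Nat) : Int) := by simp
  rw [h0, h1, Int.toNat_natCast, pvInnerA_spec weights n hn hw m 0 []]
  simp only [Nat.zero_mod, Nat.cast_zero, List.nil_append, Nat.zero_add]
  have hrec := pvOuterA_spec weights n m hn hm hw n 1
      (0 + pvPtp (pvWinL weights n m 0)) (by omega) (by omega) (by omega)
  simp only [Nat.one_mul] at hrec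
  unfold pvPtp at hrec
  rw [hrec, Finset.range_eq_Ico, Finset.sum_eq_sum_Ico_succ_bot (by omega : 0 < n / Nat.gcd n m)]
  simp only [Nat.zero_mul]
  unfold pvPtp
  ring

theorem pvGcdB_eq (a b : Nat) : pvGcdB a b = Nat.gcd a b := by
  fun_induction pvGcdB a b with
  | case1 _a => simp
  | case2 a b ih =>
    rw [ih, Nat.gcd_comm, ← Nat.gcd_rec, Nat.gcd_comm]

theorem pvTileLen (w : List Int) (r : Nat) :
    ((List.replicate r w).flatten).length = r * w.length := by
  induction r with
  | zero => simp
  | succ r ih => simp [List.replicate_succ, ih]; ring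

theorem pvTile (w : List Int) (r t : Nat) (ht : t < r * w.length)
    (h2 : t < ((List.replicate r w).flatten).length) (h3 : t % w.length < w.length) :
    ((List.replicate r w).flatten)[t]'h2 = w[t % w.length]'h3 := by
  induction r generalizing t with
  | zero => omega
  | succ r ih =>
    have hwpos : 0 < w.length := by
      rcases Nat.eq_zero_or_pos w.length with h0 | h0
      · rw [h0] at h3; omega
      · exact h0
    have hexp : (r + 1) * w.length = r * w.length + w.length := by ring
    rcases Nat.lt_or_ge t w.length with hlt | hge
    · have : t % w.length = t := Nat.mod_eq_of_lt hlt
      simp only [List.replicate_succ, List.flatten_cons]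
      rw [List.getElem_append_left (by omega)]
      congr 1
      omega
    · simp only [List.replicate_succ, List.flatten_cons]
      rw [List.getElem_append_right (by omega)]
      have hm : (t - w.length) % w.length = t % w.length := (Nat.mod_eq_sub_mod hge).symm
      have := ih (t - w.length) (by omega) (by rw [pvTileLen]; omega) (by omega)
      rw [this]
      simp only [hm]

theorem pvIdxEq (n a i : Nat) : ((a % n) + i) % n = (a + i) % n := by
  simp [Nat.add_mod]

theorem pvSliceWin (weights : List Int) (n m k : Nat) (hn : 0 < n) (hm : 0 < m)
    (hw : n ≤ weights.length) :
    PySem.List.slice ((List.replicate (m / n + 2) (weights.take n)).flatten)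
        (some (((k * m) % n : Nat) : Int))
        (some ((((k * m) % n : Nat) : Int) + (m : Nat))) =
      pvWinL weights n m (k * m) := by
  rw [PySem.List.slice_natCast_add]
  have hwl : (weights.take n).length = n := by simp [List.length_take]; omega
  have hdl : ((List.replicate (m / n + 2) (weights.take n)).flatten).length = (m / n + 2) * n := by
    rw [pvTileLen, hwl]
  have hs : (k * m) % n < n := Nat.mod_lt _ hn
  have hdm := Nat.div_add_mod m n
  have hmn : m % n < n := Nat.mod_lt _ hn
  have hexp : (m / n + 2) * n = n * (m / n) + 2 * n := by ring
  have hsm : (k * m) % n + m ≤ (m / n + 2) * n := by omega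
  apply List.ext_getElem
  · simp only [List.length_take, List.length_drop, pvWinL, List.length_map, List.length_range, hdl]
    omega
  · intro i h1 h2
    have him : i < m := by
      simp only [List.length_take, List.length_drop, hdl] at h1; omega
    rw [List.getElem_take, List.getElem_drop]
    rw [pvTile (weights.take n) (m / n + 2) ((k * m) % n + i) (by rw [hwl]; omega)
      (by rw [hdl]; omega) (by rw [hwl]; exact Nat.mod_lt _ hn)]
    simp only [pvWinL, List.getElem_map, List.getElem_range]
    rw [List.getElem_take]
    rw [List.getD_eq_getElem weights 0 (by have := Nat.mod_lt (k * m + i) hn; omega)]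
    congr 1
    rw [hwl, pvIdxEq]

theorem pvCompTake (weights : List Int) (n : Nat) (hw : n ≤ weights.length) :
    (List.range n).map (fun i => (PySem.List.pyGet? weights ((i : Nat) : Int)).getD 0)
      = weights.take n := by
  apply List.ext_getElem
  · simp; omega
  · intro i h1 h2
    simp only [List.getElem_map, List.getElem_range, List.getElem_take]
    rw [PySem.List.pyGet?_natCast]
    have hi : i < weights.length := by simp at h1; omega
    rw [List.getElem?_eq_getElem hi]
    rfl

theorem pvB_eq (weights : List Int) (n m : Nat) (hn : 0 < n) (hm : 0 < m)
    (hw : n ≤ weights.length) :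
    calculate_weight_range_sum_alt (n : Int) (m : Int) weights =
      ∑ j ∈ Finset.range (n / Nat.gcd n m), pvPtp (pvWinL weights n m (j * m)) := by
  unfold calculate_weight_range_sum_alt
  simp only [Int.toNat_natCast]
  rw [pvGcdB_eq, Nat.gcd_comm m n, pvCompTake weights n hw]
  have hrep : PySem.List.pyRepeat (weights.take n) ((m / n + 2 : Nat) : Int)
      = (List.replicate (m / n + 2) (weights.take n)).flatten := by
    unfold PySem.List.pyRepeat
    rw [Int.toNat_natCast]
  rw [hrep, PySem.List.foldl_add]
  have hmap : ∀ k : Nat,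
      pvWinB ((List.replicate (m / n + 2) (weights.take n)).flatten) ((k * m) % n) m
        = pvPtp (pvWinL weights n m (k * m)) := by
    intro k
    unfold pvWinB pvPtp
    rw [pvSliceWin weights n m k hn hm hw]
  simp only [hmap, zero_add]
  rfl

-- ===== VERDICT (by name: the statement is the Claim_ definition above) =====
theorem calculate_weight_range_sum_spec : Claim_equal_calculate_weight_range_sum := by
  intro N M weights _hDom hPre
  obtain ⟨hN, hM, hw⟩ := hPre
  unfold Spec_calculate_weight_range_sum
  have hNn : N = ((N.toNat : Nat) : Int) := by omega
  have hMn : M = ((M.toNat : Nat) : Int) := by omega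
  rw [hNn, hMn, pvA_eq weights N.toNat M.toNat (by omega) (by omega) (by omega),
      pvB_eq weights N.toNat M.toNat (by omega) (by omega) (by omega)]
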